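-- pv_equiv track=rewrite | github.com/dengsauve/advent-of-code-2025 | day04.py | remove_rolls
-- ===== SOURCE A (Python) =====
-- def remove_rolls(floor):
--     accessible_spots = 0
--     removed_coords = []
--     for i, row in enumerate(floor):
--         for j, spot in enumerate(row):
--             if spot == "@":
--                 blank_spaces = 8
--                 # Check top left
--                 if i > 0 and j > 0:
--                     if floor[i - 1][j - 1] == "@":
--                         blank_spaces -= 1
--                 # Check top
--                 if i > 0:
--                     if floor[i - 1][j] == "@":
--                         blank_spaces -= 1
--                 # Check top right
--                 if i > 0 and j < len(row) - 1:
--                     if floor[i - 1][j + 1] == "@":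
--                         blank_spaces -= 1
--                 # Check left
--                 if j > 0:
--                     if row[j - 1] == "@":
--                         blank_spaces -= 1
--                 # Check right
--                 if j < len(row) - 1:
--                     if row[j + 1] == "@":
--                         blank_spaces -= 1
--                 # Check bottom left
--                 if i < len(floor) - 1 and j > 0:
--                     if floor[i + 1][j - 1] == "@":
--                         blank_spaces -= 1
--                 # Check bottom
--                 if i < len(floor) - 1:
--                     if floor[i + 1][j] == "@":
--                         blank_spaces -= 1
--                 # Check bottom right
--                 if i < len(floor) - 1 and j < len(row) - 1:
--                     if floor[i + 1][j + 1] == "@":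
--                         blank_spaces -= 1
--                 if blank_spaces >= 5:
--                     accessible_spots += 1
--                     removed_coords.append([i, j])
--     for coords in removed_coords:
--         floor[coords[0]][coords[1]] = "."
--
--     return accessible_spots, floor
-- ===== SOURCE B (Python) =====
-- def remove_rolls(floor):
--     height = len(floor)
--     ats = []
--     nbr_keys = []
--     for i, row in enumerate(floor):
--         for j, spot in enumerate(row):
--             if spot == "@":
--                 ats.append((i, j))
--                 for di, dj in ((-1, -1), (-1, 0), (-1, 1), (0, -1), (0, 1), (1, -1), (1, 0), (1, 1)):
--                     ni, nj = i + di, j + dj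
--                     if 0 <= ni < height and 0 <= nj < len(floor[ni]):
--                         nbr_keys.append((ni, nj))
--     counts = {}
--     for k in nbr_keys:
--         counts[k] = counts.get(k, 0) + 1
--     removed = [c for c in ats if counts.get(c, 0) <= 3]
--     for i, j in removed:
--         floor[i][j] = "."
--     return len(removed), floor
-- ===== Notes on version B (the rewrite author's own statement) =====
-- stated objective: alternative
-- what changed: B replaces A's per-cell gather of eight individually guarded 2D lookups by a scatter pass: every '@' cell increments a dict counter at each in-bounds neighbour position, and a cell is removed when its scattered neighbour count is <= 3 (i.e. >= 5 blanks).
-- outside the precondition, e.g. on remove_rolls([['@'], ['.', '.']]): A returns (1, [['.'], ['.', '.']]), B returns (1, [['.'], ['.', '.']]); on remove_rolls([['@', '@'], ['@']]): A raises IndexError, B returns (3, [['.', '.'], ['.']])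
import Mathlib
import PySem

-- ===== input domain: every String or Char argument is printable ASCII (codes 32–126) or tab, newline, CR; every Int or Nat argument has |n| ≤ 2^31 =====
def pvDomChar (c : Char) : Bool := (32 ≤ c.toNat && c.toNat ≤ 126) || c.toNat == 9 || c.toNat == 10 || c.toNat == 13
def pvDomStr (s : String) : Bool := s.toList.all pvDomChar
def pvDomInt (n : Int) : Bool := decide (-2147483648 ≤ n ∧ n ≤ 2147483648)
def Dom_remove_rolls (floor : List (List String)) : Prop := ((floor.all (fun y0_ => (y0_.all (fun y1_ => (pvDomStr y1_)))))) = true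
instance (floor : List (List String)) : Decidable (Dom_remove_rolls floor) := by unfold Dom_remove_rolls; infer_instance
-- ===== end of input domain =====

-- B replaces A's per-cell gather of eight guarded lookups by a scatter pass building a neighbour-count
-- dict (alternative decomposition, same cost). Both Pythons mutate `floor` in place; the equivalence
-- proved here is about the returned value (which contains the mutated grid).


-- ===== PORT A =====
-- floor[i][j] for indices that Python accepts here (0 ≤ index, in range — guaranteed under Pre_).
def aGet (floor : List (List String)) (i j : Int) : String :=
  (floor.getD i.toNat []).getD j.toNat ""

-- the body of A's `if spot == "@"` block: eight sequentially guarded neighbour checks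
def aBlank (floor : List (List String)) (row : List String) (i j : Int) : Int :=
  let b : Int := 8
  let b := if i > 0 ∧ j > 0 then (if aGet floor (i-1) (j-1) = "@" then b - 1 else b) else b
  let b := if i > 0 then (if aGet floor (i-1) j = "@" then b - 1 else b) else b
  let b := if i > 0 ∧ j < (row.length : Int) - 1 then (if aGet floor (i-1) (j+1) = "@" then b - 1 else b) else b
  let b := if j > 0 then (if row.getD (j-1).toNat "" = "@" then b - 1 else b) else b
  let b := if j < (row.length : Int) - 1 then (if row.getD (j+1).toNat "" = "@" then b - 1 else b) else b
  let b := if i < (floor.length : Int) - 1 ∧ j > 0 then (if aGet floor (i+1) (j-1) = "@" then b - 1 else b) else b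
  let b := if i < (floor.length : Int) - 1 then (if aGet floor (i+1) j = "@" then b - 1 else b) else b
  let b := if i < (floor.length : Int) - 1 ∧ j < (row.length : Int) - 1 then (if aGet floor (i+1) (j+1) = "@" then b - 1 else b) else b
  b

def remove_rolls (floor : List (List String)) : Int × List (List String) :=
  let st := (PySem.List.enumerate floor).foldl (fun st ir =>
      (PySem.List.enumerate ir.2).foldl (fun st js =>
        if js.2 = "@" then
          if aBlank floor ir.2 ir.1 js.1 ≥ 5 then (st.1 + 1, st.2 ++ [(ir.1, js.1)]) else st
        else st) st)
    ((0 : Int), ([] : List (Int × Int)))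
  -- `floor[c[0]][c[1]] = "."` for each removed coordinate (indices are non-negative and in range)
  (st.1, st.2.foldl (fun f c => f.set c.1.toNat ((f.getD c.1.toNat []).set c.2.toNat ".")) floor)

-- ===== PORT B =====
def altOffsets : List (Int × Int) :=
  [(-1, -1), (-1, 0), (-1, 1), (0, -1), (0, 1), (1, -1), (1, 0), (1, 1)]

def remove_rolls_alt (floor : List (List String)) : Int × List (List String) :=
  -- first pass: collect '@' coordinates and scatter each one to its in-bounds neighbour positions
  let st := (PySem.List.enumerate floor).foldl (fun st ir =>
      (PySem.List.enumerate ir.2).foldl (fun st js =>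
        if js.2 = "@" then
          (st.1 ++ [(ir.1, js.1)],
           altOffsets.foldl (fun acc d =>
             if 0 ≤ ir.1 + d.1 ∧ ir.1 + d.1 < (floor.length : Int) ∧ 0 ≤ js.1 + d.2 ∧
                js.1 + d.2 < ((floor.getD (ir.1 + d.1).toNat []).length : Int)
             then acc ++ [(ir.1 + d.1, js.1 + d.2)] else acc) st.2)
        else st) st)
    (([] : List (Int × Int)), ([] : List (Int × Int)))
  -- counts[k] = counts.get(k, 0) + 1
  let counts := st.2.foldl (fun d k => d.insert k (d.getD k 0 + 1)) (PySem.Dict.empty : PySem.Dict (Int × Int) Int)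
  let removed := st.1.filter (fun c => counts.getD c 0 ≤ 3)
  let fl := removed.foldl (fun f c => f.set c.1.toNat ((f.getD c.1.toNat []).set c.2.toNat ".")) floor
  ((removed.length : Int), fl)

-- ===== PRECONDITION & SPEC =====
-- Pre_ excludes jagged grids that contain an '@': there A bounds-checks columns against the CURRENT
-- row's length but indexes the adjacent rows, so it raises IndexError on most of them, and where it
-- happens not to raise the agreement with any fixed neighbour convention is accidental.
def Pre_remove_rolls (floor : List (List String)) : Prop :=
  (∃ row ∈ floor, "@" ∈ row) → ∀ row ∈ floor, row.length = (floor.headD []).length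
instance (floor : List (List String)) : Decidable (Pre_remove_rolls floor) := by
  unfold Pre_remove_rolls; infer_instance

def pvWitness_remove_rolls : List (List String) := [["@", "."], [".", "@"], [".", "."]]

def Spec_remove_rolls (floor : List (List String)) (out : Int × List (List String)) : Prop :=
  out = remove_rolls_alt floor
instance (floor : List (List String)) (out : Int × List (List String)) : Decidable (Spec_remove_rolls floor out) := by
  unfold Spec_remove_rolls; infer_instance

-- ===== CLAIM (what is proved, stated in full; the proofs are below) =====
def Claim_equal_remove_rolls : Prop := ∀ (floor : List (List String)), Dom_remove_rolls floor → Pre_remove_rolls floor → Spec_remove_rolls floor (remove_rolls floor)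


-- ===== LEMMAS AND PROOFS =====

-- grid is rectangular
def pvRect (F : List (List String)) : Prop := ∀ row ∈ F, row.length = (F.headD []).length

-- B's in-bounds test for a neighbour position
abbrev pvInb (F : List (List String)) (ni nj : Int) : Prop :=
  0 ≤ ni ∧ ni < (F.length : Int) ∧ 0 ≤ nj ∧ nj < ((F.getD ni.toNat []).length : Int)

-- the neighbour positions B scatters to from an '@' cell at (i, j)
def pvNbrs (F : List (List String)) (i j : Int) : List (Int × Int) :=
  (altOffsets.filter (fun d => decide (0 ≤ i + d.1 ∧ i + d.1 < (F.length : Int) ∧ 0 ≤ j + d.2 ∧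
      j + d.2 < ((F.getD (i + d.1).toNat []).length : Int)))).map (fun d => (i + d.1, j + d.2))

def pvCondA (F : List (List String)) (ir : Int × List String) (js : Int × String) : Bool :=
  decide (js.2 = "@") && decide (aBlank F ir.2 ir.1 js.1 ≥ 5)

def pvRemA (F : List (List String)) : List (Int × Int) :=
  (PySem.List.enumerate F).flatMap (fun ir =>
    ((PySem.List.enumerate ir.2).filter (fun js => pvCondA F ir js)).map (fun js => (ir.1, js.1)))

def pvAts (F : List (List String)) : List (Int × Int) :=
  (PySem.List.enumerate F).flatMap (fun ir =>
    ((PySem.List.enumerate ir.2).filter (fun js => decide (js.2 = "@"))).map (fun js => (ir.1, js.1)))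

def pvKeys (F : List (List String)) : List (Int × Int) :=
  (PySem.List.enumerate F).flatMap (fun ir =>
    (PySem.List.enumerate ir.2).flatMap (fun js => if js.2 = "@" then pvNbrs F ir.1 js.1 else []))

def pvRemB (F : List (List String)) : List (Int × Int) :=
  (pvAts F).filter (fun c => decide (((pvKeys F).count c : Int) ≤ 3))

def pvApply (rm : List (Int × Int)) (F : List (List String)) : List (List String) :=
  rm.foldl (fun f c => f.set c.1.toNat ((f.getD c.1.toNat []).set c.2.toNat ".")) F

-- ---- closed form of A's double fold ----
lemma pv_foldl_two_if {a b : Type} (l : List a) (p q : a → Prop) [DecidablePred p] [DecidablePred q]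
    (f : a → b) (c : Int) (acc : List b) :
    l.foldl (fun st x => if p x then (if q x then (st.1 + 1, st.2 ++ [f x]) else st) else st) (c, acc)
      = (c + (((l.filter (fun x => decide (p x) && decide (q x))).length : Nat) : Int),
         acc ++ (l.filter (fun x => decide (p x) && decide (q x))).map f) := by
  induction l generalizing c acc with
  | nil => simp
  | cons x t ih =>
    by_cases hp : p x <;> by_cases hq : q x
    · simp [hp, hq, ih]; ring
    · simp [hp, hq, ih]
    · simp [hp, hq, ih]
    · simp [hp, hq, ih]

lemma pv_foldl_pair_sum {a b : Type} (l : List a) (g : a → Int) (h : a → List b) (c : Int) (acc : List b) :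
    l.foldl (fun st x => (st.1 + g x, st.2 ++ h x)) (c, acc) = (c + (l.map g).sum, acc ++ l.flatMap h) := by
  induction l generalizing c acc with
  | nil => simp
  | cons x t ih => simp [ih]; ring

lemma pv_cast_length_flatMap {a b : Type} (l : List a) (h : a → List b) :
    (l.map (fun x => (((h x).length : Nat) : Int))).sum = (((l.flatMap h).length : Nat) : Int) := by
  induction l with
  | nil => simp
  | cons x t ih => simp [ih]

lemma pvA_closed (F : List (List String)) :
    remove_rolls F = (((pvRemA F).length : Int), pvApply (pvRemA F) F) := by
  unfold remove_rolls
  have hstep : (fun (st : Int × List (Int × Int)) (ir : Int × List String) =>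
      (PySem.List.enumerate ir.2).foldl (fun st js =>
        if js.2 = "@" then
          if aBlank F ir.2 ir.1 js.1 ≥ 5 then (st.1 + 1, st.2 ++ [(ir.1, js.1)]) else st
        else st) st)
      = (fun st ir => (st.1 + ((((PySem.List.enumerate ir.2).filter (fun js => pvCondA F ir js)).length : Nat) : Int),
           st.2 ++ ((PySem.List.enumerate ir.2).filter (fun js => pvCondA F ir js)).map (fun js => (ir.1, js.1)))) := by
    funext st ir
    have := pv_foldl_two_if (PySem.List.enumerate ir.2)
      (fun js => js.2 = "@") (fun js => aBlank F ir.2 ir.1 js.1 ≥ 5)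
      (fun js => (ir.1, js.1)) st.1 st.2
    simpa [pvCondA] using this
  rw [hstep, pv_foldl_pair_sum]
  simp [pvRemA, pvApply, pv_cast_length_flatMap]

-- ---- closed form of B's double fold ----
lemma pv_foldl_pair_app {a b c : Type} (l : List a) (g : a → List b) (h : a → List c)
    (u : List b) (v : List c) :
    l.foldl (fun st x => (st.1 ++ g x, st.2 ++ h x)) (u, v) = (u ++ l.flatMap g, v ++ l.flatMap h) := by
  induction l generalizing u v with
  | nil => simp
  | cons x t ih => simp [ih]

lemma pv_foldl_append_ite {a b : Type} (l : List a) (p : a → Prop) [DecidablePred p] (f : a → b)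
    (acc : List b) :
    l.foldl (fun acc x => if p x then acc ++ [f x] else acc) acc
      = acc ++ (l.filter (fun x => decide (p x))).map f := by
  induction l generalizing acc with
  | nil => simp
  | cons x t ih => by_cases hp : p x <;> simp [hp, ih]

lemma pv_flatMap_ite_singleton {a b : Type} (l : List a) (p : a → Prop) [DecidablePred p] (f : a → b) :
    l.flatMap (fun x => if p x then [f x] else []) = (l.filter (fun x => decide (p x))).map f := by
  induction l with
  | nil => simp
  | cons x t ih => by_cases hp : p x <;> simp [hp, ih]

lemma pvB_closed (F : List (List String)) :
    remove_rolls_alt F = (((pvRemB F).length : Int), pvApply (pvRemB F) F) := by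
  unfold remove_rolls_alt
  have hstep : (fun (st : List (Int × Int) × List (Int × Int)) (ir : Int × List String) =>
      (PySem.List.enumerate ir.2).foldl (fun st js =>
        if js.2 = "@" then
          (st.1 ++ [(ir.1, js.1)],
           altOffsets.foldl (fun acc d =>
             if 0 ≤ ir.1 + d.1 ∧ ir.1 + d.1 < (F.length : Int) ∧ 0 ≤ js.1 + d.2 ∧
                js.1 + d.2 < ((F.getD (ir.1 + d.1).toNat []).length : Int)
             then acc ++ [(ir.1 + d.1, js.1 + d.2)] else acc) st.2)
        else st) st)
      = (fun st ir =>
          (st.1 ++ (PySem.List.enumerate ir.2).flatMap (fun js => if js.2 = "@" then [(ir.1, js.1)] else []),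
           st.2 ++ (PySem.List.enumerate ir.2).flatMap (fun js => if js.2 = "@" then pvNbrs F ir.1 js.1 else []))) := by
    funext st ir
    have h1 : (fun (st : List (Int × Int) × List (Int × Int)) (js : Int × String) =>
        if js.2 = "@" then
          (st.1 ++ [(ir.1, js.1)],
           altOffsets.foldl (fun acc d =>
             if 0 ≤ ir.1 + d.1 ∧ ir.1 + d.1 < (F.length : Int) ∧ 0 ≤ js.1 + d.2 ∧
                js.1 + d.2 < ((F.getD (ir.1 + d.1).toNat []).length : Int)
             then acc ++ [(ir.1 + d.1, js.1 + d.2)] else acc) st.2)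
        else st)
        = (fun st js => (st.1 ++ (if js.2 = "@" then [(ir.1, js.1)] else []),
            st.2 ++ (if js.2 = "@" then pvNbrs F ir.1 js.1 else []))) := by
      funext st js
      by_cases hc : js.2 = "@" <;> simp [hc, pvNbrs, pv_foldl_append_ite]
    rw [h1, pv_foldl_pair_app]
  rw [hstep, pv_foldl_pair_app]
  simp only [List.nil_append, PySem.Dict.foldl_insert_getD_add_one_eq_counter]
  simp only [pvRemB, pvAts, pvKeys, pv_flatMap_ite_singleton, PySem.Dict.getD_counter, pvApply]
  rfl

-- ---- A's eight gather indicators as one sum ----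
def pvGather (F : List (List String)) (i j : Int) : Int :=
  (altOffsets.map (fun d =>
    if pvInb F (i + d.1) (j + d.2) ∧ aGet F (i + d.1) (j + d.2) = "@" then (1 : Int) else 0)).sum

lemma pv_if_step (C : Prop) [Decidable C] (s : String) (b : Int) :
    (if C then (if s = "@" then b - 1 else b) else b) = b - (if C ∧ s = "@" then 1 else 0) := by
  by_cases hC : C <;> by_cases hs : s = "@" <;> simp [hC, hs]

lemma pv_rect_len (F : List (List String)) (row : List String) (hrect : pvRect F) (hrowm : row ∈ F)
    (k : Nat) (hk : k < F.length) : (F.getD k []).length = row.length := by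
  have h1 : F.getD k [] ∈ F := by
    rw [List.getD_eq_getElem F [] hk]; exact List.getElem_mem hk
  rw [hrect _ h1, hrect _ hrowm]

-- L3: on a rectangular grid A's blank count is 8 minus the number of in-bounds '@' neighbours
lemma pv_blank_eq (F : List (List String)) (row : List String) (i j : Int)
    (hrect : pvRect F) (hrow : F.getD i.toNat [] = row) (hrowm : row ∈ F)
    (hi0 : 0 ≤ i) (hiH : i < (F.length : Int)) (hj0 : 0 ≤ j) (hjW : j < (row.length : Int)) :
    aBlank F row i j = 8 - pvGather F i j := by
  have hinb : ∀ di dj : Int, pvInb F (i + di) (j + dj) ↔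
      (0 ≤ i + di ∧ i + di < (F.length : Int) ∧ 0 ≤ j + dj ∧ j + dj < (row.length : Int)) := by
    intro di dj
    unfold pvInb
    constructor
    · rintro ⟨h1, h2, h3, h4⟩
      have hk : (i + di).toNat < F.length := by omega
      have := pv_rect_len F row hrect hrowm (i + di).toNat hk
      refine ⟨h1, h2, h3, by omega⟩
    · rintro ⟨h1, h2, h3, h4⟩
      have hk : (i + di).toNat < F.length := by omega
      have := pv_rect_len F row hrect hrowm (i + di).toNat hk
      refine ⟨h1, h2, h3, by omega⟩
  have hget : ∀ dj : Int, aGet F i (j + dj) = row.getD (j + dj).toNat "" := by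
    intro dj
    unfold aGet
    rw [hrow]
  unfold aBlank
  simp only [pv_if_step]
  unfold pvGather
  simp only [altOffsets, List.map_cons, List.map_nil, List.sum_cons, List.sum_nil]
  have e1 : (if pvInb F (i + -1) (j + -1) ∧ aGet F (i + -1) (j + -1) = "@" then (1:Int) else 0)
      = (if (i > 0 ∧ j > 0) ∧ aGet F (i - 1) (j - 1) = "@" then (1:Int) else 0) := by
    apply if_congr _ rfl rfl
    rw [show i + -1 = i - 1 from by ring, show j + -1 = j - 1 from by ring]
    apply and_congr_left'
    rw [show i - 1 = i + -1 from by ring, show j - 1 = j + -1 from by ring, hinb]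
    omega
  have e2 : (if pvInb F (i + -1) (j + 0) ∧ aGet F (i + -1) (j + 0) = "@" then (1:Int) else 0)
      = (if i > 0 ∧ aGet F (i - 1) j = "@" then (1:Int) else 0) := by
    apply if_congr _ rfl rfl
    rw [show i + -1 = i - 1 from by ring, add_zero]
    apply and_congr_left'
    rw [show i - 1 = i + -1 from by ring, show j = j + 0 from by ring, hinb]
    omega
  have e3 : (if pvInb F (i + -1) (j + 1) ∧ aGet F (i + -1) (j + 1) = "@" then (1:Int) else 0)
      = (if (i > 0 ∧ j < (row.length : Int) - 1) ∧ aGet F (i - 1) (j + 1) = "@" then (1:Int) else 0) := by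
    apply if_congr _ rfl rfl
    rw [show i + -1 = i - 1 from by ring]
    apply and_congr_left'
    rw [show i - 1 = i + -1 from by ring, hinb]
    omega
  have e4 : (if pvInb F (i + 0) (j + -1) ∧ aGet F (i + 0) (j + -1) = "@" then (1:Int) else 0)
      = (if j > 0 ∧ row.getD (j - 1).toNat "" = "@" then (1:Int) else 0) := by
    apply if_congr _ rfl rfl
    rw [add_zero, show j + -1 = j - 1 from by ring, show aGet F i (j-1) = aGet F i (j + -1) from by ring_nf,
        hget (-1), show j + -1 = j - 1 from by ring]
    apply and_congr_left'
    rw [show j - 1 = j + -1 from by ring, show i = i + 0 from by ring, hinb]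
    omega
  have e5 : (if pvInb F (i + 0) (j + 1) ∧ aGet F (i + 0) (j + 1) = "@" then (1:Int) else 0)
      = (if j < (row.length : Int) - 1 ∧ row.getD (j + 1).toNat "" = "@" then (1:Int) else 0) := by
    apply if_congr _ rfl rfl
    rw [add_zero, hget 1]
    apply and_congr_left'
    rw [show i = i + 0 from by ring, hinb]
    omega
  have e6 : (if pvInb F (i + 1) (j + -1) ∧ aGet F (i + 1) (j + -1) = "@" then (1:Int) else 0)
      = (if (i < (F.length : Int) - 1 ∧ j > 0) ∧ aGet F (i + 1) (j - 1) = "@" then (1:Int) else 0) := by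
    apply if_congr _ rfl rfl
    rw [show j + -1 = j - 1 from by ring]
    apply and_congr_left'
    rw [show j - 1 = j + -1 from by ring, hinb]
    omega
  have e7 : (if pvInb F (i + 1) (j + 0) ∧ aGet F (i + 1) (j + 0) = "@" then (1:Int) else 0)
      = (if i < (F.length : Int) - 1 ∧ aGet F (i + 1) j = "@" then (1:Int) else 0) := by
    apply if_congr _ rfl rfl
    rw [add_zero]
    apply and_congr_left'
    rw [show j = j + 0 from by ring, hinb]
    omega
  have e8 : (if pvInb F (i + 1) (j + 1) ∧ aGet F (i + 1) (j + 1) = "@" then (1:Int) else 0)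
      = (if (i < (F.length : Int) - 1 ∧ j < (row.length : Int) - 1) ∧ aGet F (i + 1) (j + 1) = "@" then (1:Int) else 0) := by
    apply if_congr _ rfl rfl
    apply and_congr_left'
    rw [hinb]
    omega
  rw [e1, e2, e3, e4, e5, e6, e7, e8]
  ring

-- L4 ingredients --------------------------------------------------------

lemma pv_sum_comm {a b : Type} (l : List a) (m : List b) (f : a → b → Nat) :
    (l.map (fun x => (m.map (f x)).sum)).sum = (m.map (fun y => (l.map (fun x => f x y)).sum)).sum := by
  induction l with
  | nil => simp
  | cons x t ih => simp [ih]

-- one row contributes 1 for its cell at column qj if that cell is '@'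
lemma pv_rowCount (r : List String) (s qj : Int) :
    ((PySem.List.enumerate r s).map (fun js => if js.2 = "@" ∧ js.1 = qj then (1 : Nat) else 0)).sum
      = if s ≤ qj ∧ qj < s + (r.length : Int) ∧ r.getD (qj - s).toNat "" = "@" then 1 else 0 := by
  induction r generalizing s with
  | nil =>
    simp only [PySem.List.enumerate, List.map_nil, List.sum_nil, List.length_nil]
    split
    · rename_i h; exfalso; omega
    · rfl
  | cons x t ih =>
    rw [PySem.List.enumerate_cons]
    simp only [List.map_cons, List.sum_cons, ih (s + 1)]
    by_cases hq : qj = s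
    · subst hq
      have h0 : (qj - qj).toNat = 0 := by omega
      have ht : ¬ (qj + 1 ≤ qj ∧ qj < qj + 1 + (t.length : Int) ∧ t.getD (qj - (qj + 1)).toNat "" = "@") := by
        rintro ⟨h1, -, -⟩; omega
      have hr : (qj ≤ qj ∧ qj < qj + ((x :: t).length : Int) ∧ (x :: t).getD (qj - qj).toNat "" = "@") ↔ x = "@" := by
        rw [h0]
        simp only [List.getD_cons_zero, List.length_cons]
        constructor
        · rintro ⟨-, -, h⟩; exact h
        · intro h; refine ⟨le_refl _, by push_cast; omega, h⟩
      rw [if_congr hr rfl rfl, if_neg ht]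
      by_cases hx : x = "@"
      · rw [if_pos hx]
        simp [hx]
      · rw [if_neg hx]
        simp [hx]
    · have hhead : ¬ (x = "@" ∧ s = qj) := by rintro ⟨-, h⟩; exact hq h.symm
      simp only [if_neg hhead, Nat.zero_add]
      by_cases hin : s + 1 ≤ qj ∧ qj < s + 1 + (t.length : Int) ∧ t.getD (qj - (s + 1)).toNat "" = "@"
      · rw [if_pos hin]
        have hidx : (qj - s).toNat = (qj - (s + 1)).toNat + 1 := by omega
        rw [if_pos]
        refine ⟨by omega, by simp only [List.length_cons]; push_cast; omega, ?_⟩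
        rw [hidx, List.getD_cons_succ]
        exact hin.2.2
      · rw [if_neg hin, if_neg]
        rintro ⟨h1, h2, h3⟩
        have h1' : s + 1 ≤ qj := by omega
        have hidx : (qj - s).toNat = (qj - (s + 1)).toNat + 1 := by omega
        rw [hidx, List.getD_cons_succ] at h3
        exact hin ⟨h1', by simp only [List.length_cons] at h2; push_cast at h2 ⊢; omega, h3⟩

-- the whole grid contributes 1 for position (qi, qj) if it is in bounds and holds '@'
lemma pv_gridCount_aux (F : List (List String)) (s qi qj : Int) :
    ((PySem.List.enumerate F s).map (fun ir =>
        ((PySem.List.enumerate ir.2).map (fun js =>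
          if js.2 = "@" ∧ ir.1 = qi ∧ js.1 = qj then (1 : Nat) else 0)).sum)).sum
      = if s ≤ qi ∧ qi < s + (F.length : Int) ∧ 0 ≤ qj ∧
           qj < ((F.getD (qi - s).toNat []).length : Int) ∧
           (F.getD (qi - s).toNat []).getD qj.toNat "" = "@" then 1 else 0 := by
  induction F generalizing s with
  | nil =>
    simp only [PySem.List.enumerate, List.map_nil, List.sum_nil, List.length_nil]
    split
    · rename_i h; exfalso; omega
    · rfl
  | cons r t ih =>
    rw [PySem.List.enumerate_cons]
    simp only [List.map_cons, List.sum_cons, ih (s + 1)]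
    by_cases hq : qi = s
    · subst hq
      have h0 : (qi - qi).toNat = 0 := by omega
      have ht : ¬ (qi + 1 ≤ qi ∧ qi < qi + 1 + (t.length : Int) ∧ 0 ≤ qj ∧
          qj < ((t.getD (qi - (qi + 1)).toNat []).length : Int) ∧
          (t.getD (qi - (qi + 1)).toNat []).getD qj.toNat "" = "@") := by
        rintro ⟨h1, -⟩; omega
      rw [if_neg ht, Nat.add_zero]
      have hhead : ((PySem.List.enumerate r).map (fun js =>
          if js.2 = "@" ∧ qi = qi ∧ js.1 = qj then (1 : Nat) else 0)).sum
          = if 0 ≤ qj ∧ qj < 0 + (r.length : Int) ∧ r.getD (qj - 0).toNat "" = "@" then 1 else 0 := by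
        rw [← pv_rowCount r 0 qj]
        apply congrArg
        apply List.map_congr_left
        intro js _
        by_cases h1 : js.2 = "@" <;> by_cases h2 : js.1 = qj <;> simp [h1, h2]
      rw [hhead]
      have hiff : (0 ≤ qj ∧ qj < 0 + (r.length : Int) ∧ r.getD (qj - 0).toNat "" = "@")
          ↔ (qi ≤ qi ∧ qi < qi + ((r :: t).length : Int) ∧ 0 ≤ qj ∧
             qj < (((r :: t).getD (qi - qi).toNat []).length : Int) ∧
             ((r :: t).getD (qi - qi).toNat []).getD qj.toNat "" = "@") := by
        rw [h0]
        simp only [List.getD_cons_zero, List.length_cons, zero_add, sub_zero]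
        constructor
        · rintro ⟨h1, h2, h3⟩
          exact ⟨le_refl _, by push_cast; omega, h1, h2, h3⟩
        · rintro ⟨-, -, h1, h2, h3⟩; exact ⟨h1, h2, h3⟩
      rw [if_congr hiff rfl rfl]
    · have hhead : ((PySem.List.enumerate r).map (fun js =>
          if js.2 = "@" ∧ s = qi ∧ js.1 = qj then (1 : Nat) else 0)).sum = 0 := by
        apply List.sum_eq_zero
        intro x hx
        simp only [List.mem_map] at hx
        obtain ⟨js, -, hxe⟩ := hx
        have : ¬ (js.2 = "@" ∧ s = qi ∧ js.1 = qj) := by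
          rintro ⟨-, h, -⟩; exact hq h.symm
        rw [if_neg this] at hxe; omega
      rw [hhead, Nat.zero_add]
      by_cases hin : s + 1 ≤ qi ∧ qi < s + 1 + (t.length : Int) ∧ 0 ≤ qj ∧
          qj < ((t.getD (qi - (s + 1)).toNat []).length : Int) ∧
          (t.getD (qi - (s + 1)).toNat []).getD qj.toNat "" = "@"
      · rw [if_pos hin]
        have hidx : (qi - s).toNat = (qi - (s + 1)).toNat + 1 := by omega
        rw [if_pos]
        obtain ⟨h1, h2, h3, h4, h5⟩ := hin
        refine ⟨by omega, by simp only [List.length_cons]; push_cast; omega, h3, ?_, ?_⟩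
        · rw [hidx, List.getD_cons_succ]; exact h4
        · rw [hidx, List.getD_cons_succ]; exact h5
      · rw [if_neg hin, if_neg]
        rintro ⟨h1, h2, h3, h4, h5⟩
        have h1' : s + 1 ≤ qi := by omega
        have hidx : (qi - s).toNat = (qi - (s + 1)).toNat + 1 := by omega
        rw [hidx, List.getD_cons_succ] at h4 h5
        exact hin ⟨h1', by simp only [List.length_cons] at h2; push_cast at h2 ⊢; omega, h3, h4, h5⟩

lemma pv_gridCount (F : List (List String)) (qi qj : Int) :
    ((PySem.List.enumerate F).map (fun ir =>
        ((PySem.List.enumerate ir.2).map (fun js =>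
          if js.2 = "@" ∧ ir.1 = qi ∧ js.1 = qj then (1 : Nat) else 0)).sum)).sum
      = if pvInb F qi qj ∧ aGet F qi qj = "@" then 1 else 0 := by
  have := pv_gridCount_aux F 0 qi qj
  rw [this]
  apply if_congr _ rfl rfl
  unfold pvInb aGet
  constructor
  · rintro ⟨h1, h2, h3, h4, h5⟩
    rw [sub_zero] at h4 h5
    exact ⟨⟨h1, by omega, h3, h4⟩, h5⟩
  · rintro ⟨⟨h1, h2, h3, h4⟩, h5⟩
    rw [sub_zero]
    exact ⟨h1, by omega, h3, h4, h5⟩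

lemma pv_sum_ite_countP {a : Type} (l : List a) (p : a → Prop) [DecidablePred p] :
    (l.map (fun x => if p x then (1 : Nat) else 0)).sum = l.countP (fun x => decide (p x)) := by
  induction l with
  | nil => simp
  | cons x t ih =>
    by_cases h : p x
    · simp [h, ih]; omega
    · simp [h, ih]

lemma pv_countP_offsets (a b : Int) (p : Int × Int → Bool)
    (hp : ∀ d, p d = true ↔ d = (a, b)) :
    altOffsets.countP p = if (a, b) ∈ altOffsets then 1 else 0 := by
  have h1 : altOffsets.countP p = altOffsets.count (a, b) := by
    rw [List.count_eq_countP]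
    apply List.countP_congr
    intro d _
    rw [hp d, beq_iff_eq]
  rw [h1]
  by_cases hm : (a, b) ∈ altOffsets
  · rw [if_pos hm, List.count_eq_one_of_mem (by decide) hm]
  · rw [if_neg hm, List.count_eq_zero_of_not_mem hm]

-- counting one in-bounds target among the positions scattered from (i, j)
lemma pv_count_nbrs (F : List (List String)) (i j ci cj : Int) (hc : pvInb F ci cj) :
    (pvNbrs F i j).count (ci, cj) = if (ci - i, cj - j) ∈ altOffsets then 1 else 0 := by
  unfold pvNbrs
  rw [List.count_eq_countP, List.countP_map, List.countP_filter]
  apply pv_countP_offsets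
  intro d
  simp only [Function.comp, beq_iff_eq, Bool.and_eq_true, decide_eq_true_eq, Prod.ext_iff]
  constructor
  · rintro ⟨⟨h1, h2⟩, -⟩; constructor <;> omega
  · rintro ⟨h1, h2⟩
    have he1 : i + d.1 = ci := by omega
    have he2 : j + d.2 = cj := by omega
    rw [he1, he2]
    have hc' := hc
    unfold pvInb at hc'
    exact ⟨⟨rfl, rfl⟩, by tauto⟩

lemma pv_cell_split (i j ci cj : Int) :
    (if (ci - i, cj - j) ∈ altOffsets then (1 : Nat) else 0)
      = (altOffsets.map (fun d => if i = ci - d.1 ∧ j = cj - d.2 then (1 : Nat) else 0)).sum := by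
  rw [pv_sum_ite_countP, pv_countP_offsets]
  intro d
  simp only [decide_eq_true_eq, Prod.ext_iff]
  constructor
  · rintro ⟨h1, h2⟩; constructor <;> omega
  · rintro ⟨h1, h2⟩; constructor <;> omega

-- L4: the scatter count at an in-bounds cell equals the gather count there
lemma pv_count_keys (F : List (List String)) (ci cj : Int)
    (hc : pvInb F ci cj) :
    (((pvKeys F).count (ci, cj) : Nat) : Int) = pvGather F ci cj := by
  have hnat : (pvKeys F).count (ci, cj)
      = (altOffsets.map (fun d =>
          if pvInb F (ci - d.1) (cj - d.2) ∧ aGet F (ci - d.1) (cj - d.2) = "@" then (1 : Nat) else 0)).sum := by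
    unfold pvKeys
    rw [List.count_flatMap]
    have hrow : ∀ ir : Int × List String,
        ((PySem.List.enumerate ir.2).map
            (List.count (ci, cj) ∘ fun js => if js.2 = "@" then pvNbrs F ir.1 js.1 else [])).sum
        = (altOffsets.map (fun d =>
            ((PySem.List.enumerate ir.2).map (fun js =>
              if js.2 = "@" ∧ ir.1 = ci - d.1 ∧ js.1 = cj - d.2 then (1 : Nat) else 0)).sum)).sum := by
      intro ir
      rw [← pv_sum_comm]
      apply congrArg
      apply List.map_congr_left
      intro js _
      simp only [Function.comp]
      by_cases h : js.2 = "@"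
      · rw [if_pos h, pv_count_nbrs F ir.1 js.1 ci cj hc, pv_cell_split]
        apply congrArg
        apply List.map_congr_left
        intro d _
        exact if_congr (by tauto) rfl rfl
      · rw [if_neg h]
        simp only [List.count_nil]
        symm
        apply List.sum_eq_zero
        intro x hx
        simp only [List.mem_map] at hx
        obtain ⟨d, -, hxe⟩ := hx
        rw [if_neg (fun hcon => h hcon.1)] at hxe
        omega
    have houter : ((PySem.List.enumerate F).map
        (List.count (ci, cj) ∘ fun ir =>
          (PySem.List.enumerate ir.2).flatMap (fun js => if js.2 = "@" then pvNbrs F ir.1 js.1 else []))).sum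
        = (altOffsets.map (fun d =>
            ((PySem.List.enumerate F).map (fun ir =>
              ((PySem.List.enumerate ir.2).map (fun js =>
                if js.2 = "@" ∧ ir.1 = ci - d.1 ∧ js.1 = cj - d.2 then (1 : Nat) else 0)).sum)).sum)).sum := by
      rw [← pv_sum_comm]
      apply congrArg
      apply List.map_congr_left
      intro ir _
      simp only [Function.comp]
      rw [List.count_flatMap]
      exact hrow ir
    rw [houter]
    apply congrArg
    apply List.map_congr_left
    intro d _
    exact pv_gridCount F (ci - d.1) (cj - d.2)
  rw [hnat, Nat.cast_list_sum, List.map_map]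
  have hcast : (altOffsets.map (Nat.cast ∘ fun d =>
      if pvInb F (ci - d.1) (cj - d.2) ∧ aGet F (ci - d.1) (cj - d.2) = "@" then (1 : Nat) else 0))
      = altOffsets.map (fun d =>
        if pvInb F (ci + -d.1) (cj + -d.2) ∧ aGet F (ci + -d.1) (cj + -d.2) = "@" then (1 : Int) else 0) := by
    apply List.map_congr_left
    intro d _
    simp only [Function.comp, sub_eq_add_neg]
    by_cases h : pvInb F (ci + -d.1) (cj + -d.2) ∧ aGet F (ci + -d.1) (cj + -d.2) = "@" <;> simp [h]
  rw [hcast]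
  have hmapneg : (altOffsets.map (fun d =>
      if pvInb F (ci + -d.1) (cj + -d.2) ∧ aGet F (ci + -d.1) (cj + -d.2) = "@" then (1 : Int) else 0))
      = (altOffsets.map (fun e => ((-e.1 : Int), (-e.2 : Int)))).map (fun d =>
        if pvInb F (ci + d.1) (cj + d.2) ∧ aGet F (ci + d.1) (cj + d.2) = "@" then (1 : Int) else 0) := by
    rw [List.map_map]
    rfl
  rw [hmapneg, show (altOffsets.map (fun e => ((-e.1 : Int), (-e.2 : Int)))) = altOffsets.reverse from by decide,
     List.map_reverse, List.sum_reverse]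
  rfl

-- ---- main equality of the two removal lists ----
lemma pv_remAB (F : List (List String)) (hpre : Pre_remove_rolls F) : pvRemA F = pvRemB F := by
  unfold pvRemA pvRemB pvAts
  rw [List.filter_flatMap]
  apply List.flatMap_congr
  intro ir hir
  rw [List.filter_map, List.filter_filter]
  apply congrArg
  apply List.filter_congr
  intro js hjs
  by_cases hat : js.2 = "@"
  · obtain ⟨k, hk, hire⟩ := (PySem.List.mem_enumerate_iff F 0 ir).1 hir
    obtain ⟨l, hl, hjse⟩ := (PySem.List.mem_enumerate_iff ir.2 0 js).1 hjs
    have hi1 : ir.1 = (k : Int) := by rw [hire]; simp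
    have hi2 : ir.2 = F[k] := by rw [hire]
    have hj1 : js.1 = (l : Int) := by rw [hjse]; simp
    have hrowm : ir.2 ∈ F := by rw [hi2]; exact List.getElem_mem hk
    have hatm : "@" ∈ ir.2 := by
      rw [← hat]
      have : js.2 = ir.2[l] := by rw [hjse]
      rw [this]
      exact List.getElem_mem hl
    have hrect : pvRect F := hpre ⟨ir.2, hrowm, hatm⟩
    have hrow : F.getD ir.1.toNat [] = ir.2 := by
      simp only [hi1, hi2, Int.toNat_natCast]
      exact List.getD_eq_getElem F [] hk
    have hi0 : (0 : Int) ≤ ir.1 := by rw [hi1]; positivity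
    have hiH : ir.1 < (F.length : Int) := by rw [hi1]; exact_mod_cast hk
    have hj0 : (0 : Int) ≤ js.1 := by rw [hj1]; positivity
    have hjW : js.1 < (ir.2.length : Int) := by rw [hj1]; exact_mod_cast hl
    have hblank := pv_blank_eq F ir.2 ir.1 js.1 hrect hrow hrowm hi0 hiH hj0 hjW
    have hcinb : pvInb F ir.1 js.1 := by
      unfold pvInb
      rw [hrow]
      exact ⟨hi0, hiH, hj0, hjW⟩
    have hcount := pv_count_keys F ir.1 js.1 hcinb
    simp only [pvCondA, hat, decide_true, Bool.true_and, Bool.and_true, Function.comp]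
    rw [decide_eq_decide]
    omega
  · simp [pvCondA, hat]

-- ===== VERDICT (by name: the statement is the Claim_ definition above) =====
theorem remove_rolls_spec : Claim_equal_remove_rolls := by
  intro F _ hpre
  unfold Spec_remove_rolls
  rw [pvA_closed, pvB_closed, pv_remAB F hpre]
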